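-- pv_equiv track=rewrite | github.com/kaedea/notion-down | utils/database_utils.py | get_database_sorts
-- ===== SOURCE A (Python) =====
-- from typing import Dict, List, Optional
--
-- def get_database_sorts(properties: Dict) -> List[Dict]:
--     """Determine database row sorting configuration.
--
--     Priority:
--     1. Number property with description == 'order'
--     2. Number property with name == 'Order' (case-insensitive)
--     3. Created time (default)
--
--     Args:
--         properties: Database properties schema from Notion API
--
--     Returns:
--         List of sort objects for Notion API query
--     """
--     # Default sort
--     sorts = [
--         {
--             "timestamp": "created_time",
--             "direction": "ascending"
--         }
--     ]
--
--     if not properties: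
--         return sorts
--
--     candidate_prop = None
--     # Priority level: 0=None, 1=Name Match, 2=Description Match
--     priority = 0
--
--     for name, prop in properties.items():
--         if prop.get('type') == 'number':
--             # Check description (Highest priority)
--             description = prop.get('description', '')
--             if description and description.lower() == 'order':
--                 candidate_prop = name
--                 priority = 2
--                 break
--
--             # Check name (Secondary priority)
--             # Matches 'Order' (case-insensitive)
--             if priority < 1 and name.lower() == 'order':
--                 candidate_prop = name
--                 priority = 1
--
--     if candidate_prop:
--         sorts = [
--             {
--                 "property": candidate_prop,
--                 "direction": "ascending"
--             }
--         ]
--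
--     return sorts
-- ===== SOURCE B (Python) =====
-- def get_database_sorts(properties):
--     """Determine database row sorting configuration (two-scan priority search)."""
--     # Highest priority: number property whose description is 'order'.
--     for name, prop in properties.items():
--         if prop.get('type') == 'number':
--             description = prop.get('description', '')
--             if description and description.lower() == 'order':
--                 return [{"property": name, "direction": "ascending"}]
--     # Secondary priority: number property whose name is 'order' (case-insensitive).
--     for name, prop in properties.items():
--         if prop.get('type') == 'number' and name.lower() == 'order':
--             return [{"property": name, "direction": "ascending"}]
--     # Default: created time.
--     return [{"timestamp": "created_time", "direction": "ascending"}]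
-- ===== Notes on version B (the rewrite author's own statement) =====
-- stated objective: simpler
-- what changed: Replaces A's single pass with mutable candidate/priority state and a break by two plain early-return scans (description match first, then name match), with no state to maintain.
-- intended difference: When the first number property whose description is 'order' has the empty string as its name, A's truthiness test 'if candidate_prop:' silently discards the match and returns the default created_time sort, while B returns the sort keyed on that property, which is the intended value since the description explicitly requested it. — e.g. on get_database_sorts([("", [("type", "number"), ("description", "order")])]): A returns [[("timestamp", "created_time"), ("direction", "ascending")]], B returns [[("property", ""), ("direction", "ascending")]]
import Mathlib
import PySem

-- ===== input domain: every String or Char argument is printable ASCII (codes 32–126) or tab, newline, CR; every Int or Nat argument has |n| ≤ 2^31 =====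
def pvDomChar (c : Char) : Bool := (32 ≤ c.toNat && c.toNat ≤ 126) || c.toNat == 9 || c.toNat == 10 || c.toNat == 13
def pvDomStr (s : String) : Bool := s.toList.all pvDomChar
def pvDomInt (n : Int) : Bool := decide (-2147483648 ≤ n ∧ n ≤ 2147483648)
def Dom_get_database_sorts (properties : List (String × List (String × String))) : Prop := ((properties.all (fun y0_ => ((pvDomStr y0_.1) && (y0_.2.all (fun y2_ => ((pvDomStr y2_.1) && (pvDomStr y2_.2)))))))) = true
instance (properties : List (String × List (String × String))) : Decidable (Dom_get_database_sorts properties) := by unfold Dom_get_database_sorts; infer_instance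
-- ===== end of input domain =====

-- B replaces A's single pass with candidate/priority state and a break by two plain early-return
-- scans (description match, then name match); objective: simpler. Return value only (no mutation).

-- shared Python primitives: prop.get('type') == 'number' and the description guard
-- `description and description.lower() == 'order'` (dict lookup = first match)
def pvIsNumber (prop : List (String × String)) : Bool :=
  (PySem.Dict.mk prop).get? "type" == some "number"

def pvDescOrder (prop : List (String × String)) : Bool :=
  let description := (PySem.Dict.mk prop).getD "description" ""
  !(description == "") && (PySem.Str.lower description == "order")

-- ===== PORT A =====
-- the for-loop with candidate_prop/priority state; a description hit breaks immediately
def pvLoopA : List (String × List (String × String)) → Option String × Int → Option String × Int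
  | [], st => st
  | (name, prop) :: rest, (cand, prio) =>
    if pvIsNumber prop then
      if pvDescOrder prop then (some name, 2)
      else if decide (prio < 1) && (PySem.Str.lower name == "order") then
        pvLoopA rest (some name, 1)
      else pvLoopA rest (cand, prio)
    else pvLoopA rest (cand, prio)

def get_database_sorts (properties : List (String × List (String × String))) : List (List (String × String)) :=
  let sorts := [[("timestamp", "created_time"), ("direction", "ascending")]]
  if properties.isEmpty then sorts
  else
    let st := pvLoopA properties (none, 0)
    match st.1 with
    | some candidate => if candidate == "" then sorts   -- `if candidate_prop:` truthiness
                        else [[("property", candidate), ("direction", "ascending")]]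
    | none => sorts

-- ===== PORT B =====
-- first scan: first number property whose description is 'order'
def pvFirstDesc : List (String × List (String × String)) → Option String
  | [] => none
  | (name, prop) :: rest =>
    if pvIsNumber prop then
      if pvDescOrder prop then some name else pvFirstDesc rest
    else pvFirstDesc rest

-- second scan: first number property whose name is 'order' (case-insensitive)
def pvFirstName : List (String × List (String × String)) → Option String
  | [] => none
  | (name, prop) :: rest =>
    if pvIsNumber prop && (PySem.Str.lower name == "order") then some name
    else pvFirstName rest

def get_database_sorts_alt (properties : List (String × List (String × String))) : List (List (String × String)) :=
  match pvFirstDesc properties with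
  | some name => [[("property", name), ("direction", "ascending")]]
  | none =>
    match pvFirstName properties with
    | some name => [[("property", name), ("direction", "ascending")]]
    | none => [[("timestamp", "created_time"), ("direction", "ascending")]]

-- ===== PRECONDITION & SPEC =====
-- When the first number property whose description is 'order' has the empty string as its name,
-- A's `if candidate_prop:` truthiness test discards the match and returns the default
-- created_time sort; B returns the sort keyed on that property, the intended value since the
-- description explicitly requested it.
def D_get_database_sorts (properties : List (String × List (String × String))) : Prop :=
  (properties.find? (fun np => pvIsNumber np.2 && pvDescOrder np.2)).map Prod.fst = some ""
instance (properties : List (String × List (String × String))) : Decidable (D_get_database_sorts properties) := by unfold D_get_database_sorts; infer_instance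

def Spec_get_database_sorts (properties : List (String × List (String × String))) (out : List (List (String × String))) : Prop := ¬ D_get_database_sorts properties → out = get_database_sorts_alt properties
instance (properties : List (String × List (String × String))) (out : List (List (String × String))) : Decidable (Spec_get_database_sorts properties out) := by unfold Spec_get_database_sorts; infer_instance

def pvDiffWitness_get_database_sorts : (List (String × List (String × String))) :=
  [("", [("type", "number"), ("description", "order")])]
def pvDiffWitnessOut_get_database_sorts : (List (List (String × String))) × (List (List (String × String))) :=
  ([[("timestamp", "created_time"), ("direction", "ascending")]],
   [[("property", ""), ("direction", "ascending")]])

-- ===== CLAIM (what is proved, stated in full; the proofs are below) =====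
def Claim_unchanged_get_database_sorts : Prop := ∀ (properties : List (String × List (String × String))), Dom_get_database_sorts properties → Spec_get_database_sorts properties (get_database_sorts properties)
def Claim_changed_get_database_sorts : Prop := Dom_get_database_sorts (pvDiffWitness_get_database_sorts) ∧ D_get_database_sorts (pvDiffWitness_get_database_sorts) ∧ get_database_sorts (pvDiffWitness_get_database_sorts) = pvDiffWitnessOut_get_database_sorts.1 ∧ get_database_sorts_alt (pvDiffWitness_get_database_sorts) = pvDiffWitnessOut_get_database_sorts.2 ∧ pvDiffWitnessOut_get_database_sorts.1 ≠ pvDiffWitnessOut_get_database_sorts.2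
def Claim_exact_get_database_sorts : Prop := ∀ (properties : List (String × List (String × String))), Dom_get_database_sorts properties → D_get_database_sorts properties → get_database_sorts properties ≠ get_database_sorts_alt properties

-- ===== LEMMAS AND PROOFS =====

-- from the priority-1 state A only looks for a description match, keeping c as fallback
theorem pvLoopA_one (l : List (String × List (String × String))) (c : String) :
    pvLoopA l (some c, 1) =
      match pvFirstDesc l with
      | some n => (some n, 2)
      | none => (some c, 1) := by
  induction l with
  | nil => rfl
  | cons np rest ih =>
    obtain ⟨name, prop⟩ := np
    simp only [pvLoopA, pvFirstDesc]
    by_cases ht : pvIsNumber prop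
    · by_cases hd : pvDescOrder prop
      · simp [ht, hd]
      · simp [ht, hd, ih]
    · simp [ht, ih]

-- A's whole loop from the initial state, in terms of B's two scans
theorem pvLoopA_spec (l : List (String × List (String × String))) :
    pvLoopA l (none, 0) =
      match pvFirstDesc l with
      | some n => (some n, 2)
      | none =>
        match pvFirstName l with
        | some n => (some n, 1)
        | none => (none, 0) := by
  induction l with
  | nil => rfl
  | cons np rest ih =>
    obtain ⟨name, prop⟩ := np
    simp only [pvLoopA, pvFirstDesc, pvFirstName]
    by_cases ht : pvIsNumber prop
    · by_cases hd : pvDescOrder prop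
      · simp [ht, hd]
      · by_cases hn : (PySem.Str.lower name == "order") = true
        · simp [ht, hd, hn, pvLoopA_one]
        · simp [ht, hd, hn, ih]
    · simp [ht, ih]

-- B's first scan is the find? used by D_
theorem pvFirstDesc_eq_find (l : List (String × List (String × String))) :
    pvFirstDesc l = (l.find? (fun np => pvIsNumber np.2 && pvDescOrder np.2)).map Prod.fst := by
  induction l with
  | nil => rfl
  | cons np rest ih =>
    obtain ⟨name, prop⟩ := np
    simp only [pvFirstDesc, List.find?]
    by_cases ht : pvIsNumber prop
    · by_cases hd : pvDescOrder prop
      · simp [ht, hd]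
      · simp [ht, hd, ih]
    · simp [ht, ih]

-- a name-match result really is a name whose lowercase is 'order' (hence nonempty)
theorem pvFirstName_lower (l : List (String × List (String × String))) (n : String)
    (h : pvFirstName l = some n) : (PySem.Str.lower n == "order") = true := by
  induction l with
  | nil => simp [pvFirstName] at h
  | cons np rest ih =>
    obtain ⟨name, prop⟩ := np
    simp only [pvFirstName] at h
    by_cases hc : (pvIsNumber prop && (PySem.Str.lower name == "order")) = true
    · simp [hc] at h
      subst h
      exact (Bool.and_eq_true _ _ |>.mp hc).2
    · simp [hc] at h
      exact ih h

theorem pvFirstName_ne_empty (l : List (String × List (String × String))) (n : String)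
    (h : pvFirstName l = some n) : (n == "") = false := by
  cases hb : (n == "") with
  | false => rfl
  | true =>
    have hn : n = "" := beq_iff_eq.mp hb
    subst hn
    exact absurd (pvFirstName_lower l "" h) (by decide)

theorem pvFirstDesc_ne_nil (l : List (String × List (String × String))) (n : String)
    (h : pvFirstDesc l = some n) : l.isEmpty = false := by
  cases l with
  | nil => simp [pvFirstDesc] at h
  | cons a t => rfl

theorem pvFirstName_ne_nil (l : List (String × List (String × String))) (n : String)
    (h : pvFirstName l = some n) : l.isEmpty = false := by
  cases l with
  | nil => simp [pvFirstName] at h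
  | cons a t => rfl

-- ===== VERDICT (by name: the statement is the Claim_ definition above) =====
theorem get_database_sorts_spec : Claim_unchanged_get_database_sorts := by
  intro properties _hDom hnd
  unfold D_get_database_sorts at hnd
  rw [← pvFirstDesc_eq_find] at hnd
  unfold get_database_sorts get_database_sorts_alt
  simp only [pvLoopA_spec]
  cases hfd : pvFirstDesc properties with
  | some n =>
    have hne : (n == "") = false := by
      cases hb : (n == "") with
      | false => rfl
      | true =>
        exact absurd (by rw [hfd, beq_iff_eq.mp hb]) hnd
    simp [pvFirstDesc_ne_nil properties n hfd, hne]
  | none =>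
    cases hfn : pvFirstName properties with
    | some n =>
      simp [pvFirstName_ne_nil properties n hfn,
            pvFirstName_ne_empty properties n hfn]
    | none =>
      cases properties with
      | nil => rfl
      | cons a t => simp

theorem get_database_sorts_changed : Claim_changed_get_database_sorts := by
  unfold Claim_changed_get_database_sorts; decide

theorem get_database_sorts_tight : Claim_exact_get_database_sorts := by
  intro properties _hDom hd
  unfold D_get_database_sorts at hd
  rw [← pvFirstDesc_eq_find] at hd
  unfold get_database_sorts get_database_sorts_alt
  simp only [pvLoopA_spec]
  simp [pvFirstDesc_ne_nil properties "" hd, hd]
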